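-- pv_equiv track=rewrite | github.com/ob1kenoby/Regex_Engine | Regex Engine/task/regex/regex.py | regex_comparison
-- ===== SOURCE A (Python) =====
-- def regex_comparison(pattern, string):
--     if len(pattern) == 0:
--         return True
--     elif len(pattern) > 0 and len(string) == 0:
--         return False
--     elif pattern[0] == '\\' and len(pattern) > 1:
--         if pattern[1] == string[0]:
--             return regex_comparison(pattern[2:], string[1:])
--     elif pattern[0] == string[0] or pattern[0] == '.':
--         return regex_comparison(pattern[1:], string[1:])
--     return False
-- ===== SOURCE B (Python) =====
-- def regex_comparison(pattern, string):
--     # Iterative matcher: two integer cursors into pattern and string, no slicing.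
--     i = 0
--     j = 0
--     while True:
--         if i >= len(pattern):
--             return True
--         if j >= len(string):
--             return False
--         c = pattern[i]
--         if c == '\\' and i + 1 < len(pattern):
--             if pattern[i + 1] != string[j]:
--                 return False
--             i += 2
--             j += 1
--         elif c == string[j] or c == '.':
--             i += 1
--             j += 1
--         else:
--             return False
-- ===== Notes on version B (the rewrite author's own statement) =====
-- stated objective: faster
-- what changed: Replaced the recursion over freshly sliced pattern/string suffixes by an iterative while loop with two integer cursors, so no suffix copies are made.
import Mathlib
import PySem

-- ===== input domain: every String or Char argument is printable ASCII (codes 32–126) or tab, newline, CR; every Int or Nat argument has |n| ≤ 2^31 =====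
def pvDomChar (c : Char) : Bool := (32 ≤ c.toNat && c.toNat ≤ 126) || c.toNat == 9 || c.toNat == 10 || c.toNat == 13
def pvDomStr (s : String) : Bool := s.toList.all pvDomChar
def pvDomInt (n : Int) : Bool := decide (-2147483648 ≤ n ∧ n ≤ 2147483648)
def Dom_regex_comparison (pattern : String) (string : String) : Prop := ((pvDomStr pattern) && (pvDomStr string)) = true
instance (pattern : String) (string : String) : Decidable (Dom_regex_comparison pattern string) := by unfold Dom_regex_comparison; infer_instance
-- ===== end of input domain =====

-- B replaces A's recursion over sliced suffixes by an iterative two-cursor loop (no suffix copies); return value proved equal.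

-- ===== PORT A =====
-- A, step for step, over the character lists: the if/elif chain in A's order;
-- pattern[2:]/string[1:] are the suffix slices List.drop 2 / List.drop 1.
def pvRegexA (p s : List Char) : Bool :=
  if p.length = 0 then true
  else if 0 < p.length ∧ s.length = 0 then false
  else if p.getD 0 ' ' = '\\' ∧ 1 < p.length then
    (if p.getD 1 ' ' = s.getD 0 ' ' then pvRegexA (List.drop 2 p) (List.drop 1 s)
     else false)
  else if p.getD 0 ' ' = s.getD 0 ' ' ∨ p.getD 0 ' ' = '.' then
    pvRegexA (List.drop 1 p) (List.drop 1 s)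
  else false
termination_by p.length
decreasing_by all_goals simp [List.length_drop]; omega

def regex_comparison (pattern : String) (string : String) : Bool :=
  pvRegexA pattern.toList string.toList

-- ===== PORT B =====
-- B's while loop: cursors i into the pattern and j into the string.
def pvRegexLoop (p s : List Char) (i j : Nat) : Bool :=
  if p.length ≤ i then true
  else if s.length ≤ j then false
  else
    let c := p.getD i ' '
    if c = '\\' ∧ i + 1 < p.length then
      if p.getD (i + 1) ' ' ≠ s.getD j ' ' then false
      else pvRegexLoop p s (i + 2) (j + 1)
    else if c = s.getD j ' ' ∨ c = '.' then pvRegexLoop p s (i + 1) (j + 1)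
    else false
termination_by p.length - i
decreasing_by all_goals omega

def regex_comparison_alt (pattern : String) (string : String) : Bool :=
  pvRegexLoop pattern.toList string.toList 0 0

-- ===== PRECONDITION & SPEC =====
def Spec_regex_comparison (pattern : String) (string : String) (out : Bool) : Prop := out = regex_comparison_alt pattern string
instance (pattern : String) (string : String) (out : Bool) : Decidable (Spec_regex_comparison pattern string out) := by unfold Spec_regex_comparison; infer_instance

-- ===== CLAIM (what is proved, stated in full; the proofs are below) =====
def Claim_equal_regex_comparison : Prop := ∀ (pattern : String) (string : String), Dom_regex_comparison pattern string → Spec_regex_comparison pattern string (regex_comparison pattern string)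

-- ===== LEMMAS AND PROOFS =====

-- Loop invariant: the cursor state (i, j) of B computes A's answer on the suffixes.
theorem pvRegexLoop_eq (p s : List Char) (i j : Nat) :
    pvRegexLoop p s i j = pvRegexA (List.drop i p) (List.drop j s) := by
  fun_induction pvRegexLoop p s i j with
  | case1 i j h =>
      rw [List.drop_eq_nil_of_le h, pvRegexA]
      simp
  | case2 i j h1 h2 =>
      rw [List.drop_eq_nil_of_le h2, pvRegexA]
      simp [List.length_drop]
      omega
  | case3 i j h1 h2 c hc hne =>
      rw [pvRegexA]
      simp only [List.length_drop, List.getD, List.getElem?_drop, Nat.add_zero]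
      simp only [List.getD] at hne
      rw [if_neg (by omega), if_neg (by omega), if_pos ⟨hc.1, by omega⟩,
          if_neg (by simpa using hne)]
  | case4 i j h1 h2 c hc hne ih =>
      rw [pvRegexA]
      simp only [List.length_drop, List.getD, List.getElem?_drop, Nat.add_zero,
        List.drop_drop]
      simp only [List.getD] at hne
      rw [if_neg (by omega), if_neg (by omega), if_pos ⟨hc.1, by omega⟩,
          if_pos (by simpa using not_ne_iff.mp hne)]
      exact ih
  | case5 i j h1 h2 c hc hor ih =>
      rw [pvRegexA]
      simp only [List.length_drop, List.getD, List.getElem?_drop, Nat.add_zero,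
        List.drop_drop]
      rw [if_neg (by omega), if_neg (by omega),
          if_neg (by intro hx; exact hc ⟨hx.1, by omega⟩),
          if_pos (by simpa [c, List.getD] using hor)]
      exact ih
  | case6 i j h1 h2 c hc hor =>
      rw [pvRegexA]
      simp only [List.length_drop, List.getD, List.getElem?_drop, Nat.add_zero]
      rw [if_neg (by omega), if_neg (by omega),
          if_neg (by intro hx; exact hc ⟨hx.1, by omega⟩),
          if_neg (by simpa [c, List.getD] using hor)]

-- ===== VERDICT (by name: the statement is the Claim_ definition above) =====
theorem regex_comparison_spec : Claim_equal_regex_comparison := by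
  intro pattern string _
  unfold Spec_regex_comparison regex_comparison regex_comparison_alt
  rw [pvRegexLoop_eq]
  simp
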